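-- pv_equiv track=rewrite | github.com/nivannelson/ML_Projects_2024-25 | Lab1/hashmaptest.py | substrings_with_two_unique_chars
-- ===== SOURCE A (Python) =====
-- def substrings_with_two_unique_chars(s):
--     substrings = []
--     start = 0
--     char_count = {}
--
--     for end in range(len(s)):
--         char_count[s[end]] = char_count.get(s[end], 0) + 1
--
--         # Shrink the window if more than 2 unique characters
--         while len(char_count) > 2:
--             char_count[s[start]] -= 1
--             if char_count[s[start]] == 0:
--                 del char_count[s[start]]
--             start += 1
--
--         # Check if there are exactly 2 unique characters
--         if len(char_count) == 2:
--             substrings.append(s[start:end+1])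
--
--     return substrings
-- ===== SOURCE B (Python) =====
-- def substrings_with_two_unique_chars(s):
--     result = []
--     for end in range(len(s)):
--         first = s[end]
--         second = None
--         j = end - 1
--         while j >= 0:
--             c = s[j]
--             if c != first:
--                 if second is None:
--                     second = c
--                 elif c != second:
--                     break
--             j -= 1
--         if second is not None:
--             result.append(s[j + 1:end + 1])
--     return result
-- ===== Notes on version B (the rewrite author's own statement) =====
-- stated objective: alternative
-- what changed: Replaces A's stateful sliding window (a char-count dict plus a count-based shrink loop carried across positions) by a stateless per-position backward scan that remembers just the last two distinct characters and stops at the nearest third one.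
import Mathlib
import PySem

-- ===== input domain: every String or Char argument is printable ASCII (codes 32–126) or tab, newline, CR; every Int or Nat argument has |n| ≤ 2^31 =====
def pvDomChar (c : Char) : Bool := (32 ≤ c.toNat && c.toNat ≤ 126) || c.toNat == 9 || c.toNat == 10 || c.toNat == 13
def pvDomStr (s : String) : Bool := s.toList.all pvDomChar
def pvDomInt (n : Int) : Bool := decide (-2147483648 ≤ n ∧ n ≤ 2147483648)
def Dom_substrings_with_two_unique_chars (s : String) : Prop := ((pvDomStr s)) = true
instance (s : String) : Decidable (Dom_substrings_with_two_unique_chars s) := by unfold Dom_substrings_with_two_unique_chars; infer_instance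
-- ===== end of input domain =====

-- B replaces A's stateful sliding window (char-count dict + shrink loop) by a stateless
-- per-position backward scan for the last two distinct characters (objective: alternative;
-- not faster — same outputs by a different algorithm).

-- ===== PORT A =====
-- while len(char_count) > 2: … — ported with fuel = len(s), which bounds the loop (start
-- only increases and stays ≤ end < len(s) whenever the loop body runs).
-- char_count[s[start]] -= 1 is ported as insert (getD - 1): exact, the key is present
-- whenever the Python line runs; s[i] for the in-range loop indices is cs.getD i ' '.
def pvShrinkA (cs : List Char) (fuel start : Nat) (cc : PySem.Dict Char Int) : Nat × PySem.Dict Char Int :=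
  match fuel with
  | 0 => (start, cc)
  | fuel+1 =>
    if 2 < cc.size then
      let c := cs.getD start ' '
      let cc1 := cc.insert c (cc.getD c 0 - 1)
      let cc2 := if cc1.getD c 0 = 0 then cc1.erase c else cc1
      pvShrinkA cs fuel (start+1) cc2
    else (start, cc)

def substrings_with_two_unique_chars (s : String) : List String :=
  let cs := s.toList
  ((List.range cs.length).foldl (fun st e =>
      let c := cs.getD e ' '
      let cc := st.2.2.insert c (st.2.2.getD c 0 + 1)
      let r := pvShrinkA cs cs.length st.2.1 cc
      if r.2.size = 2 then
        (st.1 ++ [String.ofList (PySem.List.slice cs (some (r.1 : Int)) (some ((e : Int) + 1)))], r.1, r.2)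
      else (st.1, r.1, r.2))
    ([], 0, PySem.Dict.empty)).1

-- ===== PORT B =====
-- while j >= 0: … — ported as structural recursion on k = j + 1; the returned first
-- component is j + 1, i.e. the window start.
def pvScanB (cs : List Char) (first : Char) (second : Option Char) (k : Nat) : Nat × Option Char :=
  match k with
  | 0 => (0, second)
  | k+1 =>
    let c := cs.getD k ' '
    if c ≠ first then
      match second with
      | none => pvScanB cs first (some c) k
      | some s2 => if c ≠ s2 then (k+1, second) else pvScanB cs first second k
    else pvScanB cs first second k

def substrings_with_two_unique_chars_alt (s : String) : List String :=
  let cs := s.toList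
  (List.range cs.length).foldl (fun res e =>
    let first := cs.getD e ' '
    let r := pvScanB cs first none e
    match r.2 with
    | some _ => res ++ [String.ofList (PySem.List.slice cs (some (r.1 : Int)) (some ((e : Int) + 1)))]
    | none => res) []

-- ===== PRECONDITION & SPEC =====
def Spec_substrings_with_two_unique_chars (s : String) (out : List String) : Prop := out = substrings_with_two_unique_chars_alt s
instance (s : String) (out : List String) : Decidable (Spec_substrings_with_two_unique_chars s out) := by unfold Spec_substrings_with_two_unique_chars; infer_instance

-- ===== CLAIM (what is proved, stated in full; the proofs are below) =====
def Claim_equal_substrings_with_two_unique_chars : Prop := ∀ (s : String), Dom_substrings_with_two_unique_chars s → Spec_substrings_with_two_unique_chars s (substrings_with_two_unique_chars s)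

-- ===== LEMMAS AND PROOFS =====

-- The window s[m:i] and its number of distinct characters.
def pvW (cs : List Char) (m i : Nat) : List Char := (cs.drop m).take (i - m)
def pvDC (cs : List Char) (i m : Nat) : Nat := (pvW cs m i).toFinset.card

theorem pvDC_exists (cs : List Char) (i : Nat) : ∃ m, pvDC cs i m ≤ 2 :=
  ⟨i, by simp [pvDC, pvW]⟩

-- least start m with at most 2 distinct characters in s[m:i]
def pvMS (cs : List Char) (i : Nat) : Nat := Nat.find (pvDC_exists cs i)

-- the common output: for each end e, the window s[pvMS (e+1) : e+1] when it has exactly 2 distinct chars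
def pvOut (cs : List Char) (i : Nat) : List String :=
  (List.range i).filterMap (fun e =>
    if pvDC cs (e+1) (pvMS cs (e+1)) = 2
    then some (String.ofList (pvW cs (pvMS cs (e+1)) (e+1))) else none)

-- the dict abstraction: cc represents the multiset of characters of w
def pvRep (d : PySem.Dict Char Int) (w : List Char) : Prop :=
  d.keys.Nodup ∧ (∀ c, d.getD c 0 = (w.count c : Int)) ∧ (∀ c, d.contains c = true ↔ c ∈ w)

-- ---- Dict.erase lemmas (not in the PySem book) ----
theorem pv_find?_filter_ne {κ ν : Type} [BEq κ] [LawfulBEq κ] [DecidableEq κ] (l : List (κ × ν)) (k c : κ) :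
    (l.filter (fun p => !(p.1 == k))).find? (fun p => p.1 == c)
      = if c = k then none else l.find? (fun p => p.1 == c) := by
  induction l with
  | nil => simp
  | cons p t ih =>
    by_cases hpk : p.1 = k
    · by_cases hck : c = k <;>
        simp [hpk, ih, hck, Ne.symm]
    · by_cases hpc : p.1 = c
      · have hck : ¬ c = k := by rintro rfl; exact hpk hpc
        simp [hpc, hck]
      · simp [hpk, hpc, ih]

theorem pv_get?_erase {κ ν : Type} [BEq κ] [LawfulBEq κ] [DecidableEq κ] (d : PySem.Dict κ ν) (k c : κ) :
    (d.erase k).get? c = if c = k then none else d.get? c := by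
  simp only [PySem.Dict.get?, PySem.Dict.erase, pv_find?_filter_ne]
  split <;> rfl

theorem pv_getD_erase {κ ν : Type} [BEq κ] [LawfulBEq κ] [DecidableEq κ] (d : PySem.Dict κ ν) (k c : κ) (d0 : ν) :
    (d.erase k).getD c d0 = if c = k then d0 else d.getD c d0 := by
  simp only [PySem.Dict.getD, pv_get?_erase]
  split <;> rfl

theorem pv_contains_erase {κ ν : Type} [BEq κ] [LawfulBEq κ] [DecidableEq κ] (d : PySem.Dict κ ν) (k c : κ) :
    (d.erase k).contains c = (!(c == k) && d.contains c) := by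
  rw [PySem.Dict.contains_eq_isSome_get?, PySem.Dict.contains_eq_isSome_get?, pv_get?_erase]
  by_cases h : c = k <;> simp [h]

theorem pv_nodup_keys_erase {κ ν : Type} [BEq κ] [LawfulBEq κ] [DecidableEq κ] (d : PySem.Dict κ ν) (k : κ)
    (h : d.keys.Nodup) : (d.erase k).keys.Nodup := by
  have hsub : (d.erase k).keys.Sublist d.keys :=
    List.Sublist.map _ List.filter_sublist
  exact h.sublist hsub

-- ---- pvRep lemmas ----
theorem pvRep_empty : pvRep PySem.Dict.empty [] := by
  refine ⟨?_, ?_, ?_⟩ <;> simp [PySem.Dict.empty, PySem.Dict.keys, PySem.Dict.getD,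
    PySem.Dict.get?, PySem.Dict.contains]

theorem pvRep_size {d : PySem.Dict Char Int} {w : List Char} (h : pvRep d w) :
    d.size = w.toFinset.card := by
  obtain ⟨h1, -, h3⟩ := h
  have hkeys : d.keys.toFinset = w.toFinset := by
    ext a
    simp only [List.mem_toFinset]
    rw [← h3 a, PySem.Dict.contains_iff_mem_keys]
  have hlen : d.size = d.keys.length := by
    simp [PySem.Dict.size, PySem.Dict.keys]
  rw [hlen, ← List.toFinset_card_of_nodup h1, hkeys]

theorem pvRep_push {d : PySem.Dict Char Int} {w : List Char} (h : pvRep d w) (c0 : Char) :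
    pvRep (d.insert c0 (d.getD c0 0 + 1)) (w ++ [c0]) := by
  obtain ⟨h1, h2, h3⟩ := h
  refine ⟨PySem.Dict.nodup_keys_insert _ _ _ h1, ?_, ?_⟩
  · intro c
    rw [PySem.Dict.getD_insert]
    by_cases hc : c = c0 <;>
      simp [hc, h2 c, h2 c0, List.count_append, Ne.symm]
  · intro c
    rw [PySem.Dict.contains_insert]
    by_cases hc : c = c0 <;> simp [hc, h3 c]

theorem pvRep_pop {d : PySem.Dict Char Int} {c0 : Char} {w : List Char} (h : pvRep d (c0 :: w)) :
    pvRep (if (d.insert c0 (d.getD c0 0 - 1)).getD c0 0 = 0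
           then (d.insert c0 (d.getD c0 0 - 1)).erase c0
           else d.insert c0 (d.getD c0 0 - 1)) w := by
  obtain ⟨h1, h2, h3⟩ := h
  have hv : (d.insert c0 (d.getD c0 0 - 1)).getD c0 0 = (w.count c0 : Int) := by
    rw [PySem.Dict.getD_insert_self, h2 c0]
    simp
  by_cases h0 : (d.insert c0 (d.getD c0 0 - 1)).getD c0 0 = 0
  · rw [if_pos h0]
    have hc0w : c0 ∉ w := by
      rw [hv] at h0
      exact List.count_eq_zero.mp (by exact_mod_cast h0)
    refine ⟨pv_nodup_keys_erase _ _ (PySem.Dict.nodup_keys_insert _ _ _ h1), ?_, ?_⟩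
    · intro c
      rw [pv_getD_erase]
      by_cases hc : c = c0
      · subst hc; simp [List.count_eq_zero.mpr hc0w]

      · rw [if_neg hc, PySem.Dict.getD_insert_of_ne _ _ _ hc, h2 c]
        simp [hc, Ne.symm]
    · intro c
      rw [pv_contains_erase]
      by_cases hc : c = c0
      · subst hc; simp [hc0w]
      · rw [PySem.Dict.contains_insert]
        have := h3 c
        by_cases hcw : c ∈ w <;>
          simp_all [List.mem_cons]
  · rw [if_neg h0]
    have hc0w : c0 ∈ w := by
      rw [hv] at h0
      by_contra hmem
      exact h0 (by simp [List.count_eq_zero.mpr hmem])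
    refine ⟨PySem.Dict.nodup_keys_insert _ _ _ h1, ?_, ?_⟩
    · intro c
      by_cases hc : c = c0
      · subst hc; rw [hv]
      · rw [PySem.Dict.getD_insert_of_ne _ _ _ hc, h2 c]
        simp [hc, Ne.symm]
    · intro c
      rw [PySem.Dict.contains_insert]
      by_cases hc : c = c0
      · subst hc; simp [hc0w]
      · have := h3 c
        by_cases hcw : c ∈ w <;>
          simp_all [List.mem_cons]

-- ---- window lemmas ----
theorem pvW_nil {cs : List Char} {m i : Nat} (h : i ≤ m) : pvW cs m i = [] := by
  simp [pvW, Nat.sub_eq_zero_of_le h]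

theorem pvW_succ {cs : List Char} {m i : Nat} (hm : m ≤ i) (hi : i < cs.length) :
    pvW cs m (i+1) = pvW cs m i ++ [cs.getD i ' '] := by
  unfold pvW
  have h1 : i + 1 - m = (i - m) + 1 := by omega
  rw [h1, List.take_add_one, List.getElem?_drop]
  have h2 : m + (i - m) = i := by omega
  rw [h2, List.getElem?_eq_getElem hi, List.getD_eq_getElem cs ' ' hi]
  rfl

theorem pvW_cons {cs : List Char} {m i : Nat} (hm : m < i) (hlen : m < cs.length) :
    pvW cs m i = cs.getD m ' ' :: pvW cs (m+1) i := by
  unfold pvW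
  rw [List.drop_eq_getElem_cons hlen]
  have h1 : i - m = (i - (m+1)) + 1 := by omega
  rw [h1, List.take_succ_cons, List.getD_eq_getElem cs ' ' hlen]

theorem pvW_subset {cs : List Char} {m m' i : Nat} (h : m ≤ m') :
    (pvW cs m' i).toFinset ⊆ (pvW cs m i).toFinset := by
  by_cases hi : i ≤ m'
  · rw [pvW_nil hi]; simp
  · have hsplit : pvW cs m i = (cs.drop m).take (m' - m) ++ pvW cs m' i := by
      unfold pvW
      have h1 : i - m = (m' - m) + (i - m') := by omega
      rw [h1, List.take_add, List.drop_drop]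
      have h2 : m + (m' - m) = m' := by omega
      rw [h2]
    rw [hsplit]
    intro a ha
    simp only [List.toFinset_append, Finset.mem_union]
    exact Or.inr ha

theorem pvDC_mono_right (cs : List Char) (m i : Nat) : pvDC cs i m ≤ pvDC cs (i+1) m := by
  apply Finset.card_le_card
  intro a ha
  rw [List.mem_toFinset] at ha ⊢
  have hsub : (pvW cs m i).Sublist (pvW cs m (i+1)) :=
    (List.take_prefix_take_left (by omega)).sublist
  exact hsub.subset ha

theorem pvW_start_lt {cs : List Char} {m i : Nat} (h : pvW cs m i ≠ []) :
    m < i ∧ m < cs.length := by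
  constructor
  · by_contra hmi
    exact h (pvW_nil (by omega))
  · by_contra hml
    refine h ?_
    unfold pvW
    rw [List.drop_eq_nil_of_le (by omega), List.take_nil]

-- ---- the shrink loop computes the least admissible start ----
theorem pvShrinkA_succ (cs : List Char) (fuel start : Nat) (cc : PySem.Dict Char Int) :
    pvShrinkA cs (fuel+1) start cc =
      if 2 < cc.size then
        pvShrinkA cs fuel (start+1)
          (if (cc.insert (cs.getD start ' ') (cc.getD (cs.getD start ' ') 0 - 1)).getD (cs.getD start ' ') 0 = 0
           then (cc.insert (cs.getD start ' ') (cc.getD (cs.getD start ' ') 0 - 1)).erase (cs.getD start ' ')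
           else cc.insert (cs.getD start ' ') (cc.getD (cs.getD start ' ') 0 - 1))
      else (start, cc) := rfl

theorem pvShrinkA_spec (cs : List Char) (i : Nat) :
    ∀ fuel start d, start ≤ i → i ≤ start + fuel → pvRep d (pvW cs start i) →
    start ≤ (pvShrinkA cs fuel start d).1 ∧ (pvShrinkA cs fuel start d).1 ≤ i ∧
    pvDC cs i (pvShrinkA cs fuel start d).1 ≤ 2 ∧
    (∀ m, start ≤ m → m < (pvShrinkA cs fuel start d).1 → 2 < pvDC cs i m) ∧
    pvRep (pvShrinkA cs fuel start d).2 (pvW cs (pvShrinkA cs fuel start d).1 i) := by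
  intro fuel
  induction fuel with
  | zero =>
    intro start d h1 h2 h3
    have hsi : start = i := by omega
    subst hsi
    simp only [pvShrinkA]
    exact ⟨le_rfl, le_rfl, by simp [pvDC, pvW_nil (le_refl start)], by omega, h3⟩
  | succ fuel ih =>
    intro start d h1 h2 h3
    by_cases hsz : 2 < d.size
    · have hdc : 2 < pvDC cs i start := by
        have := pvRep_size h3
        unfold pvDC
        omega
      have hne : pvW cs start i ≠ [] := by
        intro hnil
        rw [pvDC, hnil] at hdc
        simp at hdc
      obtain ⟨hlt, hlen⟩ := pvW_start_lt hne
      have hcons := pvW_cons hlt hlen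
      rw [hcons] at h3
      have hpop := pvRep_pop h3
      rw [pvShrinkA_succ, if_pos hsz]
      obtain ⟨ih1, ih2, ih3, ih4, ih5⟩ := ih (start+1) _ (by omega) (by omega) hpop
      refine ⟨by omega, ih2, ih3, ?_, ih5⟩
      intro m hm1 hm2
      rcases Nat.eq_or_lt_of_le hm1 with hm | hm
      · rwa [hm] at hdc
      · exact ih4 m hm hm2
    · rw [pvShrinkA_succ, if_neg hsz]
      have hdc : pvDC cs i start ≤ 2 := by
        have := pvRep_size h3
        unfold pvDC
        omega
      exact ⟨le_rfl, h1, hdc, by omega, h3⟩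

-- ---- A's loop invariant ----
theorem pvMS_le (cs : List Char) (i : Nat) : pvMS cs i ≤ i :=
  Nat.find_le (by simp [pvDC, pvW_nil (le_refl i)])

theorem pvMS_min {cs : List Char} {i m : Nat} (h : m < pvMS cs i) : 2 < pvDC cs i m := by
  have := Nat.find_min (pvDC_exists cs i) h
  omega

theorem pvOut_succ (cs : List Char) (i : Nat) :
    pvOut cs (i+1) = pvOut cs i ++
      (if pvDC cs (i+1) (pvMS cs (i+1)) = 2
       then [String.ofList (pvW cs (pvMS cs (i+1)) (i+1))] else []) := by
  unfold pvOut
  rw [List.range_succ, List.filterMap_append]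
  split <;> simp_all

theorem pvA_loop (cs : List Char) : ∀ i, i ≤ cs.length →
    ∃ d, (List.range i).foldl (fun st e =>
      let c := cs.getD e ' '
      let cc := st.2.2.insert c (st.2.2.getD c 0 + 1)
      let r := pvShrinkA cs cs.length st.2.1 cc
      if r.2.size = 2 then
        (st.1 ++ [String.ofList (PySem.List.slice cs (some (r.1 : Int)) (some ((e : Int) + 1)))], r.1, r.2)
      else (st.1, r.1, r.2)) (([], 0, PySem.Dict.empty) : List String × Nat × PySem.Dict Char Int)
      = (pvOut cs i, pvMS cs i, d) ∧ pvRep d (pvW cs (pvMS cs i) i) := by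
  intro i
  induction i with
  | zero =>
    intro _
    refine ⟨PySem.Dict.empty, ?_, ?_⟩
    · simp only [List.range_zero, List.foldl_nil, pvOut, List.filterMap_nil]
      have hms : pvMS cs 0 = 0 := by
        rw [pvMS, Nat.find_eq_zero]
        simp [pvDC, pvW_nil (le_refl 0)]
      rw [hms]
    · have hms : pvMS cs 0 = 0 := by
        rw [pvMS, Nat.find_eq_zero]
        simp [pvDC, pvW_nil (le_refl 0)]
      rw [hms, pvW_nil (le_refl 0)]
      exact pvRep_empty
  | succ i ih =>
    intro hlen
    obtain ⟨d, hfold, hrep⟩ := ih (by omega)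
    rw [List.range_succ, List.foldl_append, hfold]
    simp only [List.foldl_cons, List.foldl_nil]
    have hmsle := pvMS_le cs i
    have hilen : i < cs.length := by omega
    have hpush := pvRep_push hrep (cs.getD i ' ')
    rw [← pvW_succ hmsle hilen] at hpush
    obtain ⟨hs1, hs2, hs3, hs4, hs5⟩ :=
      pvShrinkA_spec cs (i+1) cs.length (pvMS cs i)
        (d.insert (cs.getD i ' ') (d.getD (cs.getD i ' ') 0 + 1))
        (by omega) (by omega) hpush
    have hms : pvMS cs (i+1) = (pvShrinkA cs cs.length (pvMS cs i)
        (d.insert (cs.getD i ' ') (d.getD (cs.getD i ' ') 0 + 1))).1 := by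
      rw [pvMS, Nat.find_eq_iff]
      refine ⟨hs3, ?_⟩
      intro m hm
      by_cases hmi : m < pvMS cs i
      · have h1 := pvMS_min hmi
        have h2 := pvDC_mono_right cs m i
        omega
      · have := hs4 m (by omega) hm
        omega
    have hsz : (pvShrinkA cs cs.length (pvMS cs i)
        (d.insert (cs.getD i ' ') (d.getD (cs.getD i ' ') 0 + 1))).2.size
        = pvDC cs (i+1) (pvMS cs (i+1)) := by
      rw [pvRep_size hs5, hms]
      rfl
    have hslice : String.ofList (PySem.List.slice cs
        (some (((pvShrinkA cs cs.length (pvMS cs i)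
          (d.insert (cs.getD i ' ') (d.getD (cs.getD i ' ') 0 + 1))).1 : Int)))
        (some ((i : Int) + 1)))
        = String.ofList (pvW cs (pvMS cs (i+1)) (i+1)) := by
      have hcast : ((i : Int) + 1) = (((i+1 : Nat)) : Int) := by push_cast; ring
      rw [hcast, PySem.List.slice_natCast, hms]
      rfl
    refine ⟨(pvShrinkA cs cs.length (pvMS cs i)
        (d.insert (cs.getD i ' ') (d.getD (cs.getD i ' ') 0 + 1))).2, ?_, ?_⟩
    · rw [pvOut_succ]
      by_cases h2 : pvDC cs (i+1) (pvMS cs (i+1)) = 2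
      · rw [if_pos (hsz.trans h2 : _ = 2), if_pos h2, hslice, hms]
      · rw [if_neg (by rw [hsz]; exact h2), if_neg h2, hms]
        simp
    · rw [hms]
      exact hs5

-- ---- B's scan computes the same start and the same 2-distinct test ----
theorem pvScanB_succ (cs : List Char) (first : Char) (second : Option Char) (k : Nat) :
    pvScanB cs first second (k+1) =
      if cs.getD k ' ' ≠ first then
        match second with
        | none => pvScanB cs first (some (cs.getD k ' ')) k
        | some s2 => if cs.getD k ' ' ≠ s2 then (k+1, second) else pvScanB cs first second k
      else pvScanB cs first second k := rfl

theorem pvScanB_spec (cs : List Char) (e : Nat) (he : e < cs.length) :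
    ∀ k second, k ≤ e →
    (match second with
     | none => (pvW cs k (e+1)).toFinset = {cs.getD e ' '}
     | some s2 => s2 ≠ cs.getD e ' ' ∧ (pvW cs k (e+1)).toFinset = {cs.getD e ' ', s2}) →
    (pvScanB cs (cs.getD e ' ') second k).1 = pvMS cs (e+1) ∧
    ((pvScanB cs (cs.getD e ' ') second k).2.isSome ↔ pvDC cs (e+1) (pvMS cs (e+1)) = 2) := by
  intro k
  induction k with
  | zero =>
    intro second _ hinv
    have hms : pvMS cs (e+1) = 0 := by
      rw [pvMS, Nat.find_eq_zero]
      match second, hinv with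
      | none, hinv => rw [pvDC, hinv]; simp
      | some s2, ⟨hne, hinv⟩ => rw [pvDC, hinv, Finset.card_pair (Ne.symm hne)]
    match second, hinv with
    | none, hinv =>
      refine ⟨hms.symm, ?_⟩
      rw [hms]
      simp only [pvScanB]
      rw [pvDC, hinv]
      simp
    | some s2, ⟨hne, hinv⟩ =>
      refine ⟨hms.symm, ?_⟩
      rw [hms]
      simp only [pvScanB]
      rw [pvDC, hinv, Finset.card_pair (Ne.symm hne)]
      simp
  | succ k ih =>
    intro second hk hinv
    have hklen : k < cs.length := by omega
    have hcons : pvW cs k (e+1) = cs.getD k ' ' :: pvW cs (k+1) (e+1) :=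
      pvW_cons (by omega) hklen
    rw [pvScanB_succ]
    match second, hinv with
    | none, hinv =>
      by_cases hc : cs.getD k ' ' = cs.getD e ' '
      · rw [if_neg (by simpa using hc)]
        apply ih none (by omega)
        show (pvW cs k (e+1)).toFinset = {cs.getD e ' '}
        rw [hcons, hc]
        simp only [List.toFinset_cons, hinv]
        simp
      · rw [if_pos (by simpa using hc)]
        apply ih (some (cs.getD k ' ')) (by omega)
        refine ⟨hc, ?_⟩
        show (pvW cs k (e+1)).toFinset = {cs.getD e ' ', cs.getD k ' '}
        rw [hcons]
        simp only [List.toFinset_cons, hinv]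
        exact Finset.pair_comm _ _
    | some s2, ⟨hne, hinv⟩ =>
      by_cases hc : cs.getD k ' ' = cs.getD e ' '
      · rw [if_neg (by simpa using hc)]
        apply ih (some s2) (by omega)
        refine ⟨hne, ?_⟩
        show (pvW cs k (e+1)).toFinset = {cs.getD e ' ', s2}
        rw [hcons, hc]
        simp only [List.toFinset_cons, hinv]
        simp
      · rw [if_pos (by simpa using hc)]
        dsimp only
        by_cases hcs : cs.getD k ' ' = s2
        · rw [if_neg (by simpa using hcs)]
          apply ih (some s2) (by omega)
          refine ⟨hne, ?_⟩
          show (pvW cs k (e+1)).toFinset = {cs.getD e ' ', s2}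
          rw [hcons, hcs]
          simp only [List.toFinset_cons, hinv]
          exact Finset.insert_eq_self.mpr (by simp)
        · rw [if_pos (by simpa using hcs)]
          have hset : (pvW cs k (e+1)).toFinset
              = insert (cs.getD k ' ') {cs.getD e ' ', s2} := by
            rw [hcons]
            simp only [List.toFinset_cons, hinv]
          have hdc2 : pvDC cs (e+1) (k+1) = 2 := by
            rw [pvDC, hinv, Finset.card_pair (Ne.symm hne)]
          have h3 : (insert (cs.getD k ' ') ({cs.getD e ' ', s2} : Finset Char)).card = 3 := by
            rw [Finset.card_insert_of_notMem (by
                simp only [Finset.mem_insert, Finset.mem_singleton]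
                push Not
                exact ⟨hc, hcs⟩),
              Finset.card_pair (Ne.symm hne)]
          have hms : pvMS cs (e+1) = k+1 := by
            rw [pvMS, Nat.find_eq_iff]
            refine ⟨by omega, ?_⟩
            intro m hm
            have hsub := pvW_subset (cs := cs) (i := e+1) (m := m) (m' := k) (by omega)
            rw [hset] at hsub
            have hcard := Finset.card_le_card hsub
            rw [h3] at hcard
            unfold pvDC
            omega
          exact ⟨hms.symm, by simp [hms, hdc2]⟩

theorem pvB_loop (cs : List Char) : ∀ i, i ≤ cs.length →
    (List.range i).foldl (fun res e =>
      let first := cs.getD e ' '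
      let r := pvScanB cs first none e
      match r.2 with
      | some _ => res ++ [String.ofList (PySem.List.slice cs (some (r.1 : Int)) (some ((e : Int) + 1)))]
      | none => res) [] = pvOut cs i := by
  intro i
  induction i with
  | zero => intro _; simp [pvOut]
  | succ i ih =>
    intro hlen
    rw [List.range_succ, List.foldl_append, ih (by omega)]
    simp only [List.foldl_cons, List.foldl_nil]
    have hinv : (pvW cs i (i+1)).toFinset = {cs.getD i ' '} := by
      rw [pvW_cons (by omega) (by omega), pvW_nil (le_refl (i+1))]
      simp
    obtain ⟨hst, hiff⟩ := pvScanB_spec cs i (by omega) i none le_rfl hinv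
    rw [pvOut_succ]
    cases hr : (pvScanB cs (cs.getD i ' ') none i).2 with
    | none =>
      rw [hr] at hiff
      rw [if_neg (by simpa using hiff)]
      simp
    | some s2 =>
      rw [hr] at hiff
      have hdc : pvDC cs (i+1) (pvMS cs (i+1)) = 2 := by simpa using hiff
      rw [if_pos hdc]
      have hcast : ((i : Int) + 1) = (((i+1 : Nat)) : Int) := by push_cast; ring
      rw [hcast, PySem.List.slice_natCast, hst]
      rfl

-- ===== VERDICT (by name: the statement is the Claim_ definition above) =====
theorem substrings_with_two_unique_chars_spec : Claim_equal_substrings_with_two_unique_chars := by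
  intro s _
  unfold Spec_substrings_with_two_unique_chars
  unfold substrings_with_two_unique_chars substrings_with_two_unique_chars_alt
  obtain ⟨d, hA, -⟩ := pvA_loop s.toList s.toList.length le_rfl
  simp only [hA, pvB_loop s.toList s.toList.length le_rfl]
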